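-- pv_equiv track=rewrite | github.com/tormobr/advent_of_code_2024 | 05/solution.py | get_ok_not_ok_lines
-- ===== SOURCE A (Python) =====
-- def get_ok_not_ok_lines(instructions, d):
--     ok_lines = []
--     not_ok_lines = []
--     for line in instructions:
--         trimmed_dict = {key: [x for x in value if x in line] for key, value in d.items() if key in line}
--         SEEN = set()
--         for elem in line:
--             if elem in trimmed_dict.keys() and not all(x in SEEN for x in trimmed_dict[elem]):
--                 not_ok_lines.append(line)
--                 break
--             SEEN.add(elem)
--         else:
--             ok_lines.append(line)
--
--     return ok_lines, not_ok_lines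
-- ===== SOURCE B (Python) =====
-- def get_ok_not_ok_lines(instructions, d):
--     ok_lines = []
--     not_ok_lines = []
--     for line in instructions:
--         pos = {}
--         for i, p in enumerate(line):
--             if p not in pos:
--                 pos[p] = i
--         ok = all(pos[x] < pos[key]
--                  for key, vals in d.items() if key in pos
--                  for x in vals if x in pos)
--         (ok_lines if ok else not_ok_lines).append(line)
--     return ok_lines, not_ok_lines
-- ===== Notes on version B (the rewrite author's own statement) =====
-- stated objective: faster
-- what changed: Per line, B builds a first-occurrence position index once and classifies the line in a single rule-oriented pass comparing positions with O(1) dict lookups, replacing A's per-line trimmed-dict rebuild plus left-to-right SEEN-accumulator scan with early break and repeated 'x in line' list scans.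
import Mathlib
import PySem

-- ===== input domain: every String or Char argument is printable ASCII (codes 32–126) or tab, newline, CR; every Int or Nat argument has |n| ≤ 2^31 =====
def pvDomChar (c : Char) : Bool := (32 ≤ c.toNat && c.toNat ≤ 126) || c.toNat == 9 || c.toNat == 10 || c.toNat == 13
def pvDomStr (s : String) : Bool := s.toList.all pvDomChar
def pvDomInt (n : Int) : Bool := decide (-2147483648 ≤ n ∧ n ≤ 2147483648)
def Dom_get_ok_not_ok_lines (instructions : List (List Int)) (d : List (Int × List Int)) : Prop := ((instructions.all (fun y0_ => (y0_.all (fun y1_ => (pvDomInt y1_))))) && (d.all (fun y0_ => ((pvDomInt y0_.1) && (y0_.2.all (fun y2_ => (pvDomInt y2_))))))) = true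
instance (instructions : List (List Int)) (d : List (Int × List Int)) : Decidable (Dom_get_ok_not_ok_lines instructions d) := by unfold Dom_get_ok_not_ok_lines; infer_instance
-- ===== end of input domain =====

-- B replaces A's per-line trimmed-dict rebuild + SEEN-accumulator scan with early break by a
-- first-occurrence position index plus one rule-oriented pass over d (measured faster in a timing run).


-- ===== PORT A =====
-- trimmed_dict = {key: [x for x in value if x in line] for key, value in d.items() if key in line}
def pvTrim (d : List (Int × List Int)) (line : List Int) : PySem.Dict Int (List Int) :=
  d.foldl
    (fun td kv =>
      if kv.1 ∈ line then td.insert kv.1 (kv.2.filter (fun x => decide (x ∈ line))) else td)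
    PySem.Dict.empty

-- the 'for elem in line: … break / else:' loop; returns true on the 'else' (no break)
def pvScan (td : PySem.Dict Int (List Int)) : List Int → PySem.Set Int → Bool
  | [], _ => true
  | e :: rest, seen =>
      if td.contains e && !((td.getD e []).all (fun x => PySem.Set.contains seen x)) then
        false
      else
        pvScan td rest (PySem.Set.add seen e)

def get_ok_not_ok_lines (instructions : List (List Int)) (d : List (Int × List Int)) : List (List Int) × List (List Int) :=
  instructions.foldl
    (fun acc line =>
      if pvScan (pvTrim d line) line PySem.Set.empty then (acc.1 ++ [line], acc.2)
      else (acc.1, acc.2 ++ [line]))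
    ([], [])

-- ===== PORT B =====
-- pos = first-occurrence index of each page in line
def pvPosIndex (line : List Int) : PySem.Dict Int Int :=
  (PySem.List.enumerate line).foldl
    (fun pos ip => if pos.contains ip.2 then pos else pos.insert ip.2 ip.1)
    PySem.Dict.empty

-- all(pos[x] < pos[key] for key, vals in d.items() if key in pos for x in vals if x in pos)
def pvRuleOk (pos : PySem.Dict Int Int) (d : List (Int × List Int)) : Bool :=
  d.all (fun kv =>
    !(pos.contains kv.1) ||
      kv.2.all (fun x => !(pos.contains x) || decide (pos.getD x 0 < pos.getD kv.1 0)))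

def get_ok_not_ok_lines_alt (instructions : List (List Int)) (d : List (Int × List Int)) : List (List Int) × List (List Int) :=
  instructions.foldl
    (fun acc line =>
      if pvRuleOk (pvPosIndex line) d then (acc.1 ++ [line], acc.2)
      else (acc.1, acc.2 ++ [line]))
    ([], [])

-- ===== PRECONDITION & SPEC =====
-- Pre_ excludes association lists with duplicate keys: they do not encode any Python dict
-- (A's parameter d is a dict, which cannot carry duplicate keys), so nothing is claimed there.
def Pre_get_ok_not_ok_lines (instructions : List (List Int)) (d : List (Int × List Int)) : Prop :=
  (d.map Prod.fst).Nodup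
instance (instructions : List (List Int)) (d : List (Int × List Int)) : Decidable (Pre_get_ok_not_ok_lines instructions d) := by unfold Pre_get_ok_not_ok_lines; infer_instance

def pvWitness_get_ok_not_ok_lines : List (List Int) × (List (Int × List Int)) :=
  ([[1, 2, 3], [3, 1, 2]], [(1, [3]), (2, [1])])

def Spec_get_ok_not_ok_lines (instructions : List (List Int)) (d : List (Int × List Int)) (out : List (List Int) × List (List Int)) : Prop := out = get_ok_not_ok_lines_alt instructions d
instance (instructions : List (List Int)) (d : List (Int × List Int)) (out : List (List Int) × List (List Int)) : Decidable (Spec_get_ok_not_ok_lines instructions d out) := by unfold Spec_get_ok_not_ok_lines; infer_instance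

-- ===== CLAIM (what is proved, stated in full; the proofs are below) =====
def Claim_equal_get_ok_not_ok_lines : Prop := ∀ (instructions : List (List Int)) (d : List (Int × List Int)), Dom_get_ok_not_ok_lines instructions d → Pre_get_ok_not_ok_lines instructions d → Spec_get_ok_not_ok_lines instructions d (get_ok_not_ok_lines instructions d)

-- ===== LEMMAS AND PROOFS =====

-- the common specification: every rule (key, vals) of d that applies to line is respected
-- (first occurrence of each applicable val before the first occurrence of the key)
def pvGood (line : List Int) (d : List (Int × List Int)) : Prop :=
  ∀ kv ∈ d, kv.1 ∈ line → ∀ x ∈ kv.2, x ∈ line → line.idxOf x < line.idxOf kv.1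

lemma pvPosAux (l : List Int) : ∀ (s : Int) (pos : PySem.Dict Int Int) (p : Int),
    ((PySem.List.enumerate l s).foldl
      (fun pos ip => if pos.contains ip.2 then pos else pos.insert ip.2 ip.1) pos).get? p
    = match pos.get? p with
      | some v => some v
      | none => if p ∈ l then some (s + (l.idxOf p : Int)) else none := by
  induction l with
  | nil =>
      intro s pos p
      simp only [PySem.List.enumerate_nil, List.foldl_nil, List.not_mem_nil, if_false]
      cases pos.get? p <;> simp
  | cons a t ih =>
      intro s pos p
      rw [PySem.List.enumerate_cons]
      simp only [List.foldl_cons]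
      rw [ih]
      by_cases hpa : p = a
      · subst hpa
        cases h : pos.get? p with
        | some v =>
            have hc : pos.contains p = true := by
              rw [PySem.Dict.contains_eq_isSome_get?, h]; rfl
            simp [hc, h]
        | none =>
            have hc : pos.contains p = false := by
              rw [PySem.Dict.contains_eq_isSome_get?, h]; rfl
            simp [hc, PySem.Dict.get?_insert_self]
      · have hstep : ∀ (q : PySem.Dict Int Int),
            ((if q.contains a then q else q.insert a s) : PySem.Dict Int Int).get? p = q.get? p := by
          intro q; split
          · rfl
          · exact PySem.Dict.get?_insert_of_ne _ _ hpa
        rw [hstep]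
        cases h : pos.get? p with
        | some v => rfl
        | none =>
            simp only [List.mem_cons, hpa, false_or,
              List.idxOf_cons_ne t (fun hh => hpa hh.symm)]
            by_cases hm : p ∈ t
            · simp [hm]; ring
            · simp [hm]

lemma pvPos_get? (line : List Int) (p : Int) :
    (pvPosIndex line).get? p = if p ∈ line then some (line.idxOf p : Int) else none := by
  unfold pvPosIndex
  rw [pvPosAux]
  simp [PySem.Dict.get?_empty]

lemma pvRuleOk_iff (line : List Int) (d : List (Int × List Int)) :
    pvRuleOk (pvPosIndex line) d = true ↔ pvGood line d := by
  have hc : ∀ x : Int, (pvPosIndex line).contains x = decide (x ∈ line) := by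
    intro x; rw [PySem.Dict.contains_eq_isSome_get?, pvPos_get?]
    by_cases h : x ∈ line <;> simp [h]
  have hg : ∀ x : Int, (pvPosIndex line).getD x 0 =
      if x ∈ line then (line.idxOf x : Int) else 0 := by
    intro x; rw [PySem.Dict.getD_eq_get?_getD, pvPos_get?]
    by_cases h : x ∈ line <;> simp [h]
  unfold pvRuleOk pvGood
  simp only [List.all_eq_true, Bool.or_eq_true, Bool.not_eq_true', hc, hg,
    decide_eq_true_eq, decide_eq_false_iff_not]
  constructor
  · intro h kv hkv hk x hx hxl
    rcases h kv hkv with h1 | h1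
    · exact absurd hk h1
    rcases h1 x hx with h2 | h2
    · exact absurd hxl h2
    · rw [if_pos hxl, if_pos hk] at h2; exact_mod_cast h2
  · intro h kv hkv
    by_cases hk : kv.1 ∈ line
    · right; intro x hx
      by_cases hxl : x ∈ line
      · right; rw [if_pos hxl, if_pos hk]; exact_mod_cast h kv hkv hk x hx hxl
      · left; exact hxl
    · left; exact hk

lemma pvLookup_eq_none (t : List (Int × List Int)) (a : Int) (h : a ∉ t.map Prod.fst) :
    t.lookup a = none := by
  induction t with
  | nil => rfl
  | cons p t ih =>
      simp only [List.map_cons, List.mem_cons, not_or] at h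
      have hb : (a == p.1) = false := by simpa using h.1
      simp only [List.lookup, hb]
      exact ih h.2

lemma pvLookup_some_iff (t : List (Int × List Int)) (k : Int) (vs : List Int)
    (hnd : (t.map Prod.fst).Nodup) : t.lookup k = some vs ↔ (k, vs) ∈ t := by
  induction t with
  | nil => simp [List.lookup]
  | cons p t ih =>
      simp only [List.map_cons, List.nodup_cons] at hnd
      by_cases hk : k = p.1
      · have hb : (k == p.1) = true := by simpa using hk
        have ht : t.lookup k = none := by rw [hk]; exact pvLookup_eq_none t p.1 hnd.1
        simp only [List.lookup, hb, List.mem_cons]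
        constructor
        · intro h
          left
          cases p
          simp_all
        · rintro (h | h)
          · cases p; simp_all
          · exfalso
            have := List.mem_map_of_mem (f := Prod.fst) h
            rw [← hk] at hnd
            exact hnd.1 this
      · have hb : (k == p.1) = false := by simpa using hk
        simp only [List.lookup, hb]
        rw [ih hnd.2]
        constructor
        · exact fun h => List.mem_cons_of_mem _ h
        · intro h
          rcases List.mem_cons.mp h with h | h
          · cases p; simp_all
          · exact h

lemma pvMem_add (s : PySem.Set Int) (a x : Int) :
    x ∈ PySem.Set.add s a ↔ x = a ∨ x ∈ s := by
  unfold PySem.Set.add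
  by_cases hc : PySem.Set.contains s a = true
  · have ha : a ∈ s := (PySem.Set.contains_iff s a).mp hc
    simp only [hc, if_true]
    constructor
    · exact Or.inr
    · rintro (rfl | h) <;> [exact ha; exact h]
  · simp only [Bool.not_eq_true] at hc
    simp only [hc, Bool.false_eq_true, if_false, List.mem_append, List.mem_singleton]
    tauto

lemma pvMem_take_idxOf (l : List Int) : ∀ (n : Nat) (x : Int), x ∈ l.take n → l.idxOf x < n := by
  induction l with
  | nil => intro n x h; simp at h
  | cons a t ih =>
      intro n x h
      cases n with
      | zero => simp at h
      | succ n =>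
          simp only [List.take_succ_cons, List.mem_cons] at h
          by_cases hxa : x = a
          · subst hxa; simp [List.idxOf_cons_self]
          · rcases h with h | h
            · exact absurd h hxa
            · rw [List.idxOf_cons_ne t (fun e => hxa e.symm)]
              exact Nat.succ_lt_succ (ih n x h)

lemma pvSplit_at_idxOf (l : List Int) (k : Int) (h : k ∈ l) :
    l = l.take (l.idxOf k) ++ k :: l.drop (l.idxOf k + 1) := by
  have hlt : l.idxOf k < l.length := List.idxOf_lt_length_of_mem h
  conv_lhs => rw [← List.take_append_drop (l.idxOf k) l]
  rw [← List.getElem_cons_drop hlt, List.getElem_idxOf (List.idxOf_lt_length_iff.mpr h)]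

lemma pvIdxOf_le_of_split (l1 l2 : List Int) (k : Int) :
    (l1 ++ k :: l2).idxOf k ≤ l1.length := by
  by_cases h : k ∈ l1
  · rw [List.idxOf_append_of_mem h]
    exact Nat.le_of_lt (List.idxOf_lt_length_of_mem h)
  · rw [List.idxOf_append_of_notMem h]
    simp [List.idxOf_cons_self]

lemma pvMem_of_idxOf_lt (l1 l2 : List Int) (x : Int)
    (h2 : (l1 ++ l2).idxOf x < l1.length) : x ∈ l1 := by
  by_contra hx
  rw [List.idxOf_append_of_notMem hx] at h2
  omega

lemma pvTrimAux (line : List Int) : ∀ (d : List (Int × List Int)) (td : PySem.Dict Int (List Int)) (k : Int),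
    (d.map Prod.fst).Nodup →
    (d.foldl (fun td kv => if kv.1 ∈ line then td.insert kv.1 (kv.2.filter (fun x => decide (x ∈ line))) else td) td).get? k
    = match d.lookup k with
      | some vs => if k ∈ line then some (vs.filter (fun x => decide (x ∈ line))) else td.get? k
      | none => td.get? k := by
  intro d
  induction d with
  | nil => intro td k _; rfl
  | cons p t ih =>
      obtain ⟨a, ws⟩ := p
      intro td k hnd
      simp only [List.map_cons, List.nodup_cons] at hnd
      simp only [List.foldl_cons]
      rw [ih _ k hnd.2]
      by_cases hk : k = a
      · subst hk
        have ht : t.lookup k = none := pvLookup_eq_none t k hnd.1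
        simp only [ht, List.lookup_cons_self]
        by_cases hl : k ∈ line
        · simp [hl, PySem.Dict.get?_insert_self]
        · simp [hl]
      · have hb : (k == a) = false := by simpa using hk
        simp only [List.lookup, hb]
        have hstep : (if a ∈ line then td.insert a (ws.filter (fun x => decide (x ∈ line))) else td).get? k = td.get? k := by
          split
          · exact PySem.Dict.get?_insert_of_ne _ _ hk
          · rfl
        cases h : t.lookup k <;> simp [hstep]

lemma pvTrim_get? (d : List (Int × List Int)) (line : List Int) (k : Int)
    (hnd : (d.map Prod.fst).Nodup) :
    (pvTrim d line).get? k =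
      match d.lookup k with
      | some vs => if k ∈ line then some (vs.filter (fun x => decide (x ∈ line))) else none
      | none => none := by
  unfold pvTrim
  rw [pvTrimAux line d PySem.Dict.empty k hnd]
  cases d.lookup k <;> simp [PySem.Dict.get?_empty]

lemma pvScan_iff (td : PySem.Dict Int (List Int)) : ∀ (l : List Int) (seen : PySem.Set Int),
    pvScan td l seen = true ↔
    ∀ l1 e l2, l = l1 ++ e :: l2 → ∀ vs, td.get? e = some vs →
      ∀ x ∈ vs, PySem.Set.contains seen x = true ∨ x ∈ l1 := by
  intro l
  induction l with
  | nil =>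
      intro seen
      simp only [pvScan, true_iff]
      intro l1 e l2 h
      exact absurd h (by simp)
  | cons a rest ih =>
      intro seen
      rw [pvScan]
      by_cases hc : (td.contains a && !((td.getD a []).all (fun x => PySem.Set.contains seen x))) = true
      · rw [if_pos hc]
        simp only [Bool.false_eq_true, false_iff]
        intro hR
        rw [Bool.and_eq_true] at hc
        obtain ⟨hct, hall⟩ := hc
        have hg : td.get? a = some (td.getD a []) := by
          rw [PySem.Dict.contains_eq_isSome_get?] at hct
          cases h : td.get? a with
          | none => rw [h] at hct; simp at hct
          | some v => rw [PySem.Dict.getD_eq_get?_getD, h]; rfl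
        rw [Bool.not_eq_true'] at hall
        rw [List.all_eq_false] at hall
        obtain ⟨x, hx, hxs⟩ := hall
        have := hR [] a rest rfl _ hg x hx
        simp only [List.not_mem_nil, or_false] at this
        exact hxs (by simpa using this)
      · rw [if_neg hc]
        rw [ih (PySem.Set.add seen a)]
        have hadd : ∀ x : Int, PySem.Set.contains (PySem.Set.add seen a) x = true ↔
            x = a ∨ PySem.Set.contains seen x = true := by
          intro x
          rw [PySem.Set.contains_iff, pvMem_add, PySem.Set.contains_iff]
        constructor
        · intro h l1 e l2 hsplit vs hvs x hx
          cases l1 with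
          | nil =>
              simp only [List.nil_append, List.cons.injEq] at hsplit
              obtain ⟨rfl, rfl⟩ := hsplit
              left
              rw [Bool.and_eq_true] at hc
              push_neg at hc
              have hct : td.contains a = true := by
                rw [PySem.Dict.contains_eq_isSome_get?, hvs]; rfl
              have hall := hc hct
              have hall' : ((td.getD a []).all fun x => seen.contains x) = true := by
                cases hb : (td.getD a []).all fun x => seen.contains x
                · exact absurd (by rw [hb]; rfl) hall
                · rfl
              rw [List.all_eq_true] at hall'
              have hgd : td.getD a [] = vs := by
                rw [PySem.Dict.getD_eq_get?_getD, hvs]; rfl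
              rw [hgd] at hall'
              exact hall' x hx
          | cons b l1' =>
              simp only [List.cons_append, List.cons.injEq] at hsplit
              obtain ⟨rfl, hrest⟩ := hsplit
              rcases h l1' e l2 hrest vs hvs x hx with hcs | hmem
              · rcases (hadd x).mp hcs with rfl | hs
                · right; exact List.mem_cons_self ..
                · left; exact hs
              · right; exact List.mem_cons_of_mem _ hmem
        · intro h l1 e l2 hsplit vs hvs x hx
          rcases h (a :: l1) e l2 (by rw [hsplit]; rfl) vs hvs x hx with hcs | hmem
          · left; exact (hadd x).mpr (Or.inr hcs)
          · rcases List.mem_cons.mp hmem with rfl | hm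
            · left; exact (hadd x).mpr (Or.inl rfl)
            · right; exact hm

lemma pvScanA_iff (line : List Int) (d : List (Int × List Int))
    (hnd : (d.map Prod.fst).Nodup) :
    pvScan (pvTrim d line) line PySem.Set.empty = true ↔ pvGood line d := by
  rw [pvScan_iff]
  constructor
  · intro h kv hkv hk x hx hxl
    have hsplit := pvSplit_at_idxOf line kv.1 hk
    have hget : (pvTrim d line).get? kv.1 = some (kv.2.filter (fun x => decide (x ∈ line))) := by
      rw [pvTrim_get? d line kv.1 hnd,
        (pvLookup_some_iff d kv.1 kv.2 hnd).mpr (by simpa using hkv)]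
      simp [hk]
    have hh := h _ kv.1 _ hsplit _ hget x (by simp [List.mem_filter, hx, hxl])
    rcases hh with hc | hmem
    · rw [PySem.Set.contains_iff] at hc
      simp [PySem.Set.empty] at hc
    · exact pvMem_take_idxOf line (line.idxOf kv.1) x hmem
  · intro h l1 e l2 hsplit vs hvs x hx
    right
    rw [pvTrim_get? d line e hnd] at hvs
    cases hl : d.lookup e with
    | none => rw [hl] at hvs; dsimp only at hvs; cases hvs
    | some ws =>
        rw [hl] at hvs
        dsimp only at hvs
        by_cases hel : e ∈ line
        · rw [if_pos hel] at hvs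
          have hvs' : ws.filter (fun x => decide (x ∈ line)) = vs := by
            injection hvs
          have hmem := (pvLookup_some_iff d e ws hnd).mp hl
          have hx' := List.mem_filter.mp (hvs' ▸ hx)
          have hlt : line.idxOf x < line.idxOf e :=
            h (e, ws) hmem hel x hx'.1 (by simpa using hx'.2)
          have h1 : line.idxOf e ≤ l1.length := by
            rw [hsplit]; exact pvIdxOf_le_of_split l1 l2 e
          have h2 : (l1 ++ e :: l2).idxOf x < l1.length := by
            rw [← hsplit]; omega
          exact pvMem_of_idxOf_lt l1 (e :: l2) x h2
        · rw [if_neg hel] at hvs; cases hvs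

lemma pvLine_eq (line : List Int) (d : List (Int × List Int))
    (hnd : (d.map Prod.fst).Nodup) :
    pvScan (pvTrim d line) line PySem.Set.empty = pvRuleOk (pvPosIndex line) d := by
  have h := (pvScanA_iff line d hnd).trans (pvRuleOk_iff line d).symm
  cases hA : pvScan (pvTrim d line) line PySem.Set.empty <;>
    cases hB : pvRuleOk (pvPosIndex line) d <;> simp_all

-- ===== VERDICT (by name: the statement is the Claim_ definition above) =====
theorem get_ok_not_ok_lines_spec : Claim_equal_get_ok_not_ok_lines := by
  intro instructions d _ hpre
  unfold Spec_get_ok_not_ok_lines get_ok_not_ok_lines get_ok_not_ok_lines_alt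
  simp only [pvLine_eq _ d hpre]
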